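-- pv_equiv track=rewrite | github.com/kreciarze/genetic-travelling-salesman | src/ga_utils/crossover_functions.py | build_edge_table
-- ===== SOURCE A (Python) =====
-- def build_edge_table(p1, p2):
--     edge_table = {city: set() for city in p1}
--     for p in (p1, p2):
--         for i in range(len(p)):
--             city = p[i]
--             left = p[i - 1]  # Neighbor to the left
--             right = p[(i + 1) % len(p)]  # Neighbor to the right
--             edge_table[city].update([left, right])
--     return edge_table
-- ===== SOURCE B (Python) =====
-- def build_edge_table(p1, p2):
--     # Key-major rebuild: invert each parent into a city -> occurrence-index map first,
--     # then assemble each city's whole neighbour set at once from its recorded indices.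
--     occ1, occ2 = {}, {}
--     for i in range(len(p1)):
--         occ1.setdefault(p1[i], []).append(i)
--     for i in range(len(p2)):
--         occ2.setdefault(p2[i], []).append(i)
--     n1, n2 = len(p1), len(p2)
--     table = {}
--     for city, idxs in occ1.items():
--         s = set()
--         for i in idxs:
--             s.add(p1[i - 1])
--             s.add(p1[(i + 1) % n1])
--         table[city] = s
--     for city, idxs in occ2.items():
--         s = table[city]
--         for i in idxs:
--             s.add(p2[i - 1])
--             s.add(p2[(i + 1) % n2])
--     return table
-- ===== Notes on version B (the rewrite author's own statement) =====
-- stated objective: alternative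
-- what changed: A is parent-major: one nested index loop per parent that mutates each visited city's set via i-1/(i+1)%n; B is key-major: it first inverts each parent into a city -> occurrence-index map, then builds every city's whole neighbour set at once from its recorded indices.
import Mathlib
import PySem

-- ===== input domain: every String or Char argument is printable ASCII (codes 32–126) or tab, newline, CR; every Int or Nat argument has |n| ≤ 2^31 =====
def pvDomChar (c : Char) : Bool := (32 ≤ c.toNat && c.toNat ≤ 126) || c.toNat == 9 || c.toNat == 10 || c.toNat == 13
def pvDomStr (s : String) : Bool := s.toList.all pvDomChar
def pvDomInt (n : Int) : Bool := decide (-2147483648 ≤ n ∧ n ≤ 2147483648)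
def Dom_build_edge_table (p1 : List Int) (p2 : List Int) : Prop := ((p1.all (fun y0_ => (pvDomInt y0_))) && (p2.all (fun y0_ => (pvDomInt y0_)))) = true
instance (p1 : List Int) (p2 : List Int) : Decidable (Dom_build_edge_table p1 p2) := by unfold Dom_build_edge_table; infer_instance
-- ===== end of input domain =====

-- B replaces A's parent-major modulo-index loop mutating per-city sets by a key-major plan:
-- it first inverts each parent into a city -> occurrence-index map, then assembles each city's
-- whole neighbour set at once from those indices (alternative decomposition, same cost).


-- ===== PORT A =====
def build_edge_table (p1 : List Int) (p2 : List Int) : List (Int × List Int) :=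
  let d0 : PySem.Dict Int (PySem.Set Int) :=
    p1.foldl (fun d c => d.insert c PySem.Set.empty) PySem.Dict.empty
  ([p1, p2].foldl (fun d p =>
    (PySem.List.pyRange 0 (p.length : Int) 1).foldl (fun d i =>
      let city := PySem.List.pyGetD p i 0
      let left := PySem.List.pyGetD p (i - 1) 0
      let right := PySem.List.pyGetD p (PySem.Int.mod (i + 1) (p.length : Int)) 0
      d.modify city PySem.Set.empty (fun s => PySem.Set.update s [left, right])) d) d0).items

-- ===== PORT B =====
def build_edge_table_alt (p1 : List Int) (p2 : List Int) : List (Int × List Int) :=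
  let occ1 : PySem.Dict Int (List Int) :=
    (PySem.List.pyRange 0 (p1.length : Int) 1).foldl
      (fun d i => d.modify (PySem.List.pyGetD p1 i 0) [] (fun l => l ++ [i])) PySem.Dict.empty
  let occ2 : PySem.Dict Int (List Int) :=
    (PySem.List.pyRange 0 (p2.length : Int) 1).foldl
      (fun d i => d.modify (PySem.List.pyGetD p2 i 0) [] (fun l => l ++ [i])) PySem.Dict.empty
  let n1 : Int := p1.length
  let n2 : Int := p2.length
  let table1 : PySem.Dict Int (PySem.Set Int) :=
    occ1.items.foldl (fun t kv =>
      t.insert kv.1 (kv.2.foldl (fun s i =>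
        PySem.Set.add (PySem.Set.add s (PySem.List.pyGetD p1 (i - 1) 0))
          (PySem.List.pyGetD p1 (PySem.Int.mod (i + 1) n1) 0)) PySem.Set.empty)) PySem.Dict.empty
  (occ2.items.foldl (fun t kv =>
    t.modify kv.1 PySem.Set.empty (fun s => kv.2.foldl (fun s i =>
      PySem.Set.add (PySem.Set.add s (PySem.List.pyGetD p2 (i - 1) 0))
        (PySem.List.pyGetD p2 (PySem.Int.mod (i + 1) n2) 0)) s)) table1).items

-- ===== PRECONDITION & SPEC =====
-- Pre_ excludes exactly the inputs on which A raises KeyError (p2 containing a city absent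
-- from p1); B's second pass looks that city up in the table and raises KeyError there too.
def Pre_build_edge_table (p1 : List Int) (p2 : List Int) : Prop := ∀ x ∈ p2, x ∈ p1
instance (p1 : List Int) (p2 : List Int) : Decidable (Pre_build_edge_table p1 p2) := by unfold Pre_build_edge_table; infer_instance
def pvWitness_build_edge_table : List Int × List Int := ([1, 2, 3], [3, 1, 2])

def Spec_build_edge_table (p1 : List Int) (p2 : List Int) (out : List (Int × List Int)) : Prop := out = build_edge_table_alt p1 p2
instance (p1 : List Int) (p2 : List Int) (out : List (Int × List Int)) : Decidable (Spec_build_edge_table p1 p2 out) := by unfold Spec_build_edge_table; infer_instance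

-- ===== CLAIM (what is proved, stated in full; the proofs are below) =====
def Claim_equal_build_edge_table : Prop := ∀ (p1 : List Int) (p2 : List Int), Dom_build_edge_table p1 p2 → Pre_build_edge_table p1 p2 → Spec_build_edge_table p1 p2 (build_edge_table p1 p2)

-- ===== LEMMAS AND PROOFS =====

-- the common per-occurrence step: add the left and right neighbour of position i in p
def pvStep (p : List Int) (s : PySem.Set Int) (i : Int) : PySem.Set Int :=
  PySem.Set.add (PySem.Set.add s (PySem.List.pyGetD p (i - 1) 0))
    (PySem.List.pyGetD p (PySem.Int.mod (i + 1) (p.length : Int)) 0)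

-- the occurrence-index dict B builds for a parent p
def pvOcc (p : List Int) : PySem.Dict Int (List Int) :=
  (PySem.List.pyRange 0 (p.length : Int) 1).foldl
    (fun d i => d.modify (PySem.List.pyGetD p i 0) [] (fun l => l ++ [i])) PySem.Dict.empty

lemma pv_update_subset : ∀ (l : List Int) (s : PySem.Set Int), (∀ x ∈ l, x ∈ s) → PySem.Set.update s l = s := by
  intro l
  induction l with
  | nil => intro s _; rfl
  | cons a t ih =>
    intro s h
    have ha : PySem.Set.add s a = s := by
      have hmem : a ∈ s := h a (by simp)
      simp [PySem.Set.add, hmem]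
    simpa [PySem.Set.update, ha] using ih s (fun x hx => h x (by simp [hx]))

lemma pv_getD_init : ∀ (l : List Int) (d : PySem.Dict Int (PySem.Set Int)) (c : Int),
    d.getD c PySem.Set.empty = PySem.Set.empty →
    (l.foldl (fun d c => d.insert c PySem.Set.empty) d).getD c PySem.Set.empty = PySem.Set.empty := by
  intro l
  induction l with
  | nil => intro d c h; simpa using h
  | cons a t ih =>
    intro d c h
    simp only [List.foldl_cons]
    apply ih
    rw [PySem.Dict.getD_insert]
    split_ifs
    · rfl
    · exact h

lemma pv_getD_A (p : List Int) : ∀ (l : List Int) (d : PySem.Dict Int (PySem.Set Int)) (c : Int),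
    (l.foldl (fun d i =>
       d.modify (PySem.List.pyGetD p i 0) PySem.Set.empty
         (fun s => PySem.Set.update s [PySem.List.pyGetD p (i - 1) 0,
            PySem.List.pyGetD p (PySem.Int.mod (i + 1) (p.length : Int)) 0])) d).getD c PySem.Set.empty
    = (l.filter (fun i => PySem.List.pyGetD p i 0 == c)).foldl (pvStep p) (d.getD c PySem.Set.empty) := by
  intro l
  induction l with
  | nil => intro d c; rfl
  | cons i t ih =>
    intro d c
    simp only [List.foldl_cons, List.filter_cons]
    by_cases hc : PySem.List.pyGetD p i 0 = c
    · rw [if_pos (by simpa using hc), ih, List.foldl_cons]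
      congr 1
      rw [← hc, PySem.Dict.getD_modify, if_pos rfl]
      rfl
    · rw [if_neg (by simpa using hc), ih]
      congr 1
      rw [PySem.Dict.getD_modify, if_neg (fun h => hc h.symm)]

-- B's second pass: a fold of modify-with-foldl over an items list, looked up at c
lemma pv_getD_B (p : List Int) : ∀ (l : List (Int × List Int)) (d : PySem.Dict Int (PySem.Set Int)) (c : Int),
    (l.foldl (fun t kv => t.modify kv.1 PySem.Set.empty (fun s => kv.2.foldl (pvStep p) s)) d).getD c PySem.Set.empty
    = ((l.filter (fun kv => kv.1 == c)).map (fun kv => kv.2)).flatten.foldl (pvStep p) (d.getD c PySem.Set.empty) := by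
  intro l
  induction l with
  | nil => intro d c; rfl
  | cons kv t ih =>
    intro d c
    simp only [List.foldl_cons, List.filter_cons]
    by_cases hc : kv.1 = c
    · rw [if_pos (by simpa using hc), ih, List.map_cons, List.flatten_cons, List.foldl_append]
      congr 1
      rw [← hc, PySem.Dict.getD_modify, if_pos rfl]
    · rw [if_neg (by simpa using hc), ih]
      congr 1
      rw [PySem.Dict.getD_modify, if_neg (fun h => hc h.symm)]

-- B's first pass: a fold of inserts keyed by a nodup list, looked up at c
lemma pv_getD_insertfold_notmem (v : Int → PySem.Set Int) :
    ∀ (l : List Int) (d : PySem.Dict Int (PySem.Set Int)) (c : Int), c ∉ l →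
    (l.foldl (fun t k => t.insert k (v k)) d).getD c PySem.Set.empty = d.getD c PySem.Set.empty := by
  intro l
  induction l with
  | nil => intro d c _; rfl
  | cons a t ih =>
    intro d c hc
    simp only [List.foldl_cons]
    rw [ih _ _ (fun h => hc (List.mem_cons_of_mem a h)),
        PySem.Dict.getD_insert, if_neg (fun h => hc (by rw [h]; exact List.mem_cons_self))]

lemma pv_getD_insertfold_mem (v : Int → PySem.Set Int) :
    ∀ (l : List Int) (d : PySem.Dict Int (PySem.Set Int)) (c : Int), l.Nodup → c ∈ l →
    (l.foldl (fun t k => t.insert k (v k)) d).getD c PySem.Set.empty = v c := by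
  intro l
  induction l with
  | nil => intro d c _ hc; cases hc
  | cons a t ih =>
    intro d c hnd hc
    simp only [List.foldl_cons]
    by_cases hca : c = a
    · subst hca
      rw [pv_getD_insertfold_notmem v t _ c (by simpa using (List.nodup_cons.mp hnd).1),
          PySem.Dict.getD_insert, if_pos rfl]
    · exact ih _ _ (List.nodup_cons.mp hnd).2 ((List.mem_cons.mp hc).resolve_left hca)

lemma pv_occ_getD (p : List Int) (c : Int) :
    (pvOcc p).getD c []
    = (PySem.List.pyRange 0 (p.length : Int) 1).filter (fun i => PySem.List.pyGetD p i 0 == c) := by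
  unfold pvOcc
  have h : (PySem.List.pyRange 0 (p.length : Int) 1).foldl
      (fun d i => d.modify (PySem.List.pyGetD p i 0) [] (fun l => l ++ [i])) PySem.Dict.empty
    = ((PySem.List.pyRange 0 (p.length : Int) 1).map (fun i => (PySem.List.pyGetD p i 0, i))).foldl
      (fun d q => d.modify q.1 [] (fun l => l ++ [q.2])) PySem.Dict.empty := by
    rw [List.foldl_map]
  rw [h, PySem.Dict.getD_foldl_modify_append, List.filter_map, List.map_map]
  simp [Function.comp_def]

lemma pv_occ_keys (p : List Int) : (pvOcc p).keys = PySem.Set.ofList p := by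
  unfold pvOcc
  rw [PySem.Dict.keys_foldl_modify_key _ (fun i => PySem.List.pyGetD p i 0) []
        (fun _ i => (fun l => l ++ [i]))]
  have : (PySem.List.pyRange 0 (p.length : Int) 1).map (fun i => PySem.List.pyGetD p i 0) = p := by
    simpa [PySem.List.len] using PySem.List.map_pyGetD_pyRange_zero' p 0
  rw [this]
  rfl

lemma pv_occ_items (p : List Int) :
    (pvOcc p).items = (pvOcc p).keys.map (fun k => (k, (pvOcc p).getD k [])) :=
  PySem.Dict.items_eq_map_keys _ (by rw [pv_occ_keys]; exact PySem.Set.nodup_ofList p) []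

lemma pv_occ_filter (p : List Int) (c : Int) :
    (pvOcc p).items.filter (fun kv => kv.1 == c)
    = if c ∈ (pvOcc p).keys then [(c, (pvOcc p).getD c [])] else [] := by
  rw [pv_occ_items, List.filter_map]
  have hcomp : ((fun kv : Int × List Int => kv.1 == c) ∘ (fun k => (k, (pvOcc p).getD k []))) = (fun k => k == c) := rfl
  rw [hcomp, List.filter_beq]
  have hnd : (pvOcc p).keys.Nodup := by rw [pv_occ_keys]; exact PySem.Set.nodup_ofList p
  by_cases hc : c ∈ (pvOcc p).keys
  · rw [if_pos hc, List.count_eq_one_of_mem hnd hc]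
    rfl
  · rw [if_neg hc, List.count_eq_zero_of_not_mem hc]
    rfl

lemma pv_main (p1 p2 : List Int) (hpre : ∀ x ∈ p2, x ∈ p1) :
    build_edge_table p1 p2 = build_edge_table_alt p1 p2 := by
  show
    ((PySem.List.pyRange 0 (p2.length : Int) 1).foldl (fun d i =>
       d.modify (PySem.List.pyGetD p2 i 0) PySem.Set.empty
         (fun s => PySem.Set.update s [PySem.List.pyGetD p2 (i - 1) 0,
            PySem.List.pyGetD p2 (PySem.Int.mod (i + 1) (p2.length : Int)) 0]))
      ((PySem.List.pyRange 0 (p1.length : Int) 1).foldl (fun d i =>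
       d.modify (PySem.List.pyGetD p1 i 0) PySem.Set.empty
         (fun s => PySem.Set.update s [PySem.List.pyGetD p1 (i - 1) 0,
            PySem.List.pyGetD p1 (PySem.Int.mod (i + 1) (p1.length : Int)) 0]))
        (p1.foldl (fun d c => d.insert c PySem.Set.empty) PySem.Dict.empty))).items
    = ((pvOcc p2).items.foldl
        (fun t kv => t.modify kv.1 PySem.Set.empty (fun s => kv.2.foldl (pvStep p2) s))
        ((pvOcc p1).items.foldl
          (fun t kv => t.insert kv.1 (kv.2.foldl (pvStep p1) PySem.Set.empty))
          PySem.Dict.empty)).items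
  have hmap1 : (PySem.List.pyRange 0 (p1.length : Int) 1).map (fun i => PySem.List.pyGetD p1 i 0) = p1 := by
    simpa [PySem.List.len] using PySem.List.map_pyGetD_pyRange_zero' p1 0
  have hmap2 : (PySem.List.pyRange 0 (p2.length : Int) 1).map (fun i => PySem.List.pyGetD p2 i 0) = p2 := by
    simpa [PySem.List.len] using PySem.List.map_pyGetD_pyRange_zero' p2 0
  have hd0keys : (p1.foldl (fun (d : PySem.Dict Int (PySem.Set Int)) c => d.insert c PySem.Set.empty) PySem.Dict.empty).keys
      = PySem.Set.ofList p1 := by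
    rw [PySem.Dict.keys_foldl_insert p1 (fun _ _ => PySem.Set.empty)]
    rfl
  have hnd1 : (pvOcc p1).keys.Nodup := by rw [pv_occ_keys]; exact PySem.Set.nodup_ofList p1
  have hAkeys :
    ((PySem.List.pyRange 0 (p2.length : Int) 1).foldl (fun d i =>
       d.modify (PySem.List.pyGetD p2 i 0) PySem.Set.empty
         (fun s => PySem.Set.update s [PySem.List.pyGetD p2 (i - 1) 0,
            PySem.List.pyGetD p2 (PySem.Int.mod (i + 1) (p2.length : Int)) 0]))
      ((PySem.List.pyRange 0 (p1.length : Int) 1).foldl (fun d i =>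
       d.modify (PySem.List.pyGetD p1 i 0) PySem.Set.empty
         (fun s => PySem.Set.update s [PySem.List.pyGetD p1 (i - 1) 0,
            PySem.List.pyGetD p1 (PySem.Int.mod (i + 1) (p1.length : Int)) 0]))
        (p1.foldl (fun d c => d.insert c PySem.Set.empty) PySem.Dict.empty))).keys
      = PySem.Set.ofList p1 := by
    rw [PySem.Dict.keys_foldl_modify_key, PySem.Dict.keys_foldl_modify_key, hd0keys, hmap1, hmap2,
        pv_update_subset p1 _ (fun x hx => (PySem.Set.mem_ofList p1 x).mpr hx),
        pv_update_subset p2 _ (fun x hx => (PySem.Set.mem_ofList p1 x).mpr (hpre x hx))]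
  -- B's first pass, as a fold over occ1's (nodup) key list
  have htab1 :
      ((pvOcc p1).items.foldl
        (fun t kv => t.insert kv.1 (kv.2.foldl (pvStep p1) PySem.Set.empty))
        (PySem.Dict.empty : PySem.Dict Int (PySem.Set Int)))
      = (pvOcc p1).keys.foldl
        (fun t k => t.insert k (((pvOcc p1).getD k []).foldl (pvStep p1) PySem.Set.empty))
        PySem.Dict.empty := by
    rw [pv_occ_items, List.foldl_map]
  have htab1keys :
      ((pvOcc p1).items.foldl
        (fun t kv => t.insert kv.1 (kv.2.foldl (pvStep p1) PySem.Set.empty))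
        (PySem.Dict.empty : PySem.Dict Int (PySem.Set Int))).keys = PySem.Set.ofList p1 := by
    rw [htab1, PySem.Dict.keys_foldl_insert_key _ (fun k => k), pv_occ_keys,
        PySem.Dict.keys_empty, List.map_id']
    exact PySem.Set.ofList_eq_self_of_nodup _ (PySem.Set.nodup_ofList p1)
  have hBkeys :
      (((pvOcc p2).items.foldl
        (fun t kv => t.modify kv.1 PySem.Set.empty (fun s => kv.2.foldl (pvStep p2) s))
        ((pvOcc p1).items.foldl
          (fun t kv => t.insert kv.1 (kv.2.foldl (pvStep p1) PySem.Set.empty))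
          PySem.Dict.empty))).keys = PySem.Set.ofList p1 := by
    rw [PySem.Dict.keys_foldl_modify_key _ (fun kv : Int × List Int => kv.1), htab1keys]
    have hk : (pvOcc p2).items.map (fun kv => kv.1) = PySem.Set.ofList p2 := by
      rw [← pv_occ_keys p2]
      rfl
    rw [hk, pv_update_subset _ _ (fun x hx =>
      (PySem.Set.mem_ofList p1 x).mpr (hpre x ((PySem.Set.mem_ofList p2 x).mp hx)))]
  -- A items
  rw [PySem.Dict.items_eq_map_keys _ (by rw [hAkeys]; exact PySem.Set.nodup_ofList p1) PySem.Set.empty,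
      hAkeys]
  -- B items
  rw [PySem.Dict.items_eq_map_keys _ (by rw [hBkeys]; exact PySem.Set.nodup_ofList p1) PySem.Set.empty,
      hBkeys]
  -- pointwise value equality at each city of p1
  apply List.map_congr_left
  intro c hcmem
  have hc1 : c ∈ p1 := (PySem.Set.mem_ofList p1 c).mp hcmem
  rw [pv_getD_A p2, pv_getD_A p1, pv_getD_init p1 PySem.Dict.empty c rfl,
      pv_getD_B p2, htab1,
      pv_getD_insertfold_mem _ _ _ _ hnd1 (by rw [pv_occ_keys]; exact hcmem),
      pv_occ_filter, ← pv_occ_getD p1, ← pv_occ_getD p2]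
  by_cases hc2 : c ∈ (pvOcc p2).keys
  · rw [if_pos hc2]
    simp
  · rw [if_neg hc2]
    have : (pvOcc p2).getD c [] = [] := by
      apply PySem.Dict.getD_of_not_contains
      rw [← Bool.not_eq_true, PySem.Dict.contains_iff_mem_keys]
      exact hc2
    rw [this]
    rfl

-- ===== VERDICT (by name: the statement is the Claim_ definition above) =====
theorem build_edge_table_spec : Claim_equal_build_edge_table := by
  intro p1 p2 _ hpre
  unfold Spec_build_edge_table
  exact pv_main p1 p2 hpre
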